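-- pv_equiv track=rewrite | github.com/BalaShankar9/hirestack-ai | ai_engine/agents/sub_agents/gap_analysis/education_cert_analyst.py | _cert_match
-- ===== SOURCE A (Python) =====
-- _CERT_FAMILIES = {
--     "aws": ["aws certified", "aws solutions architect", "aws developer", "aws devops", "aws sysops", "aws cloud practitioner"],
--     "gcp": ["gcp certified", "google cloud", "google professional", "google associate cloud"],
--     "azure": ["azure certified", "az-900", "az-104", "az-204", "az-305", "az-400", "azure fundamentals", "azure administrator", "azure developer", "azure solutions architect"],
--     "kubernetes": ["cka", "ckad", "cks", "certified kubernetes"],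
--     "security": ["cissp", "cism", "ceh", "comptia security+", "security+", "oscp"],
--     "project": ["pmp", "prince2", "scrum master", "csm", "psm", "safe agilist"],
--     "data": ["databricks", "snowflake", "google data engineer", "aws data analytics"],
--     "ml": ["tensorflow", "google ml engineer", "aws machine learning", "deep learning specialization"],
-- }
--
-- def _cert_match(target: str, user_certs_lower: set[str]) -> bool:
--     """Check if user has a matching certification (exact or fuzzy)."""
--     # Exact match
--     if target in user_certs_lower:
--         return True
--     # Substring match either way
--     for uc in user_certs_lower:
--         if target in uc or uc in target:
--             return True
--     # Family-level match
--     for family, aliases in _CERT_FAMILIES.items():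
--         target_in_family = any(a in target for a in aliases) or family in target
--         if target_in_family:
--             user_in_family = any(any(a in uc for a in aliases) or family in uc for uc in user_certs_lower)
--             if user_in_family:
--                 return True
--     return False
-- ===== SOURCE B (Python) =====
-- _CERT_FAMILIES = {
--     "aws": ["aws certified", "aws solutions architect", "aws developer", "aws devops", "aws sysops", "aws cloud practitioner"],
--     "gcp": ["gcp certified", "google cloud", "google professional", "google associate cloud"],
--     "azure": ["azure certified", "az-900", "az-104", "az-204", "az-305", "az-400", "azure fundamentals", "azure administrator", "azure developer", "azure solutions architect"],
--     "kubernetes": ["cka", "ckad", "cks", "certified kubernetes"],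
--     "security": ["cissp", "cism", "ceh", "comptia security+", "security+", "oscp"],
--     "project": ["pmp", "prince2", "scrum master", "csm", "psm", "safe agilist"],
--     "data": ["databricks", "snowflake", "google data engineer", "aws data analytics"],
--     "ml": ["tensorflow", "google ml engineer", "aws machine learning", "deep learning specialization"],
-- }
--
--
-- def _families_of(s):
--     """All family names s belongs to (alias substring or family-name substring)."""
--     return {family for family, aliases in _CERT_FAMILIES.items()
--             if any(a in s for a in aliases) or family in s}
--
--
-- def _cert_match(target: str, user_certs_lower: set[str]) -> bool:
--     """Check if user has a matching certification (exact or fuzzy)."""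
--     # Substring match either way (subsumes exact equality, since target in target)
--     if any(target in uc or uc in target for uc in user_certs_lower):
--         return True
--     # Family-level match: intersect the target's families with the user's families
--     target_families = _families_of(target)
--     user_families = set()
--     for uc in user_certs_lower:
--         user_families |= _families_of(uc)
--     return bool(target_families & user_families)
-- ===== Notes on version B (the rewrite author's own statement) =====
-- stated objective: simpler
-- what changed: B drops the redundant exact-match scan (subsumed by the substring phase) and replaces A's interleaved short-circuit nested family loop by computing the target's family set and the union of the users' family sets independently and testing their intersection for non-emptiness.
import Mathlib
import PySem

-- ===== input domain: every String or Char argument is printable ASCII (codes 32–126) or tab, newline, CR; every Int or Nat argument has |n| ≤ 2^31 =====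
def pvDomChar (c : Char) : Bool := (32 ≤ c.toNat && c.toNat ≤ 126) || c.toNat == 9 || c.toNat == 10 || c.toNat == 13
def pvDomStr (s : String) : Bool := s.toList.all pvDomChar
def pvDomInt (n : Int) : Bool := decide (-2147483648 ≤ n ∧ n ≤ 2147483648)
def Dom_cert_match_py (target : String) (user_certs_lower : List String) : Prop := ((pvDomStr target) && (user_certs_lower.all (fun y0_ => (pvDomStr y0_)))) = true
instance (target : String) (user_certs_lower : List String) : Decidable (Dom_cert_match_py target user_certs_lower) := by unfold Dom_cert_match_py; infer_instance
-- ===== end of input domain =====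

-- B drops the redundant exact-match scan and replaces A's interleaved nested family
-- loop by two independent family-set computations and a set intersection (objective: simpler).

-- ===== PORT A =====
-- module-level constant _CERT_FAMILIES (a dict literal only iterated over, in insertion order)
def certFamilies : List (String × List String) :=
  [("aws", ["aws certified", "aws solutions architect", "aws developer", "aws devops", "aws sysops", "aws cloud practitioner"]),
   ("gcp", ["gcp certified", "google cloud", "google professional", "google associate cloud"]),
   ("azure", ["azure certified", "az-900", "az-104", "az-204", "az-305", "az-400", "azure fundamentals", "azure administrator", "azure developer", "azure solutions architect"]),
   ("kubernetes", ["cka", "ckad", "cks", "certified kubernetes"]),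
   ("security", ["cissp", "cism", "ceh", "comptia security+", "security+", "oscp"]),
   ("project", ["pmp", "prince2", "scrum master", "csm", "psm", "safe agilist"]),
   ("data", ["databricks", "snowflake", "google data engineer", "aws data analytics"]),
   ("ml", ["tensorflow", "google ml engineer", "aws machine learning", "deep learning specialization"])]

-- literal port of _cert_match: exact membership, then the substring loop, then the family loop
def cert_match_py (target : String) (user_certs_lower : List String) : Bool :=
  if PySem.Set.contains user_certs_lower target then true
  else if user_certs_lower.any (fun uc => PySem.Str.isIn target uc || PySem.Str.isIn uc target) then true
  else certFamilies.any (fun fa =>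
    let target_in_family := fa.2.any (fun a => PySem.Str.isIn a target) || PySem.Str.isIn fa.1 target
    target_in_family &&
      user_certs_lower.any (fun uc => fa.2.any (fun a => PySem.Str.isIn a uc) || PySem.Str.isIn fa.1 uc))

-- ===== PORT B =====
-- _families_of: the set of family names s belongs to
def familiesOf (s : String) : PySem.Set String :=
  PySem.Set.ofList ((certFamilies.filter
    (fun fa => fa.2.any (fun a => PySem.Str.isIn a s) || PySem.Str.isIn fa.1 s)).map Prod.fst)

def cert_match_py_alt (target : String) (user_certs_lower : List String) : Bool :=
  if user_certs_lower.any (fun uc => PySem.Str.isIn target uc || PySem.Str.isIn uc target) then true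
  else
    let target_families := familiesOf target
    let user_families := user_certs_lower.foldl
      (fun acc uc => PySem.Set.union acc (familiesOf uc)) PySem.Set.empty
    !(PySem.Set.inter target_families user_families).isEmpty

-- ===== PRECONDITION & SPEC =====
def Spec_cert_match_py (target : String) (user_certs_lower : List String) (out : Bool) : Prop := out = cert_match_py_alt target user_certs_lower
instance (target : String) (user_certs_lower : List String) (out : Bool) : Decidable (Spec_cert_match_py target user_certs_lower out) := by unfold Spec_cert_match_py; infer_instance

-- ===== CLAIM (what is proved, stated in full; the proofs are below) =====
def Claim_equal_cert_match_py : Prop := ∀ (target : String) (user_certs_lower : List String), Dom_cert_match_py target user_certs_lower → Spec_cert_match_py target user_certs_lower (cert_match_py target user_certs_lower)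

-- ===== LEMMAS AND PROOFS =====

-- 'sub in s' is reflexive: target ∈ ucs makes the substring scan fire, so A's exact phase is redundant
theorem isIn_self (l : List Char) : PySem.Chars.isIn l l = true := by
  simp [PySem.Chars.isIn_iff_infix]

theorem not_isEmpty_iff_exists_mem {α : Type} (l : List α) :
    (!l.isEmpty) = true ↔ ∃ x, x ∈ l := by
  cases l <;> simp

theorem mem_familiesOf (f s : String) :
    f ∈ familiesOf s ↔ ∃ fa ∈ certFamilies,
      fa.1 = f ∧ (fa.2.any (fun a => PySem.Str.isIn a s) || PySem.Str.isIn fa.1 s) = true := by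
  simp only [familiesOf, PySem.Set.mem_ofList, List.mem_map, List.mem_filter]
  constructor
  · rintro ⟨fa, ⟨hmem, hpred⟩, rfl⟩; exact ⟨fa, hmem, rfl, hpred⟩
  · rintro ⟨fa, hmem, rfl, hpred⟩; exact ⟨fa, ⟨hmem, hpred⟩, rfl⟩

theorem mem_foldl_union (f : String) (l : List String) (init : PySem.Set String) :
    f ∈ l.foldl (fun acc uc => PySem.Set.union acc (familiesOf uc)) init ↔
      f ∈ init ∨ ∃ uc ∈ l, f ∈ familiesOf uc := by
  induction l generalizing init with
  | nil => simp
  | cons x xs ih =>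
    simp only [List.foldl_cons, ih, PySem.Set.mem_union, List.mem_cons]
    constructor
    · rintro (⟨h | h⟩ | ⟨uc, h1, h2⟩)
      · exact Or.inl h
      · exact Or.inr ⟨x, Or.inl rfl, h⟩
      · exact Or.inr ⟨uc, Or.inr h1, h2⟩
    · rintro (h | ⟨uc, h1, h2⟩)
      · exact Or.inl (Or.inl h)
      · rcases h1 with rfl | h1
        · exact Or.inl (Or.inr h2)
        · exact Or.inr ⟨uc, h1, h2⟩

-- the family names in certFamilies are pairwise distinct
theorem certFamilies_keys_nodup : (certFamilies.map Prod.fst).Nodup := by decide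

theorem eq_of_fst_eq {fa fb : String × List String}
    (ha : fa ∈ certFamilies) (hb : fb ∈ certFamilies) (h : fa.1 = fb.1) : fa = fb := by
  have := List.inj_on_of_nodup_map certFamilies_keys_nodup
  exact this ha hb h

theorem cert_match_py_spec : Claim_equal_cert_match_py := by
  intro target ucs _
  show cert_match_py target ucs = cert_match_py_alt target ucs
  unfold cert_match_py cert_match_py_alt
  by_cases hsub : ucs.any (fun uc => PySem.Str.isIn target uc || PySem.Str.isIn uc target) = true
  · simp only [hsub]
    split <;> rfl
  · have hsub' : ucs.any (fun uc => PySem.Str.isIn target uc || PySem.Str.isIn uc target) = false :=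
      by rwa [Bool.not_eq_true] at hsub
    have hcon : PySem.Set.contains ucs target = false := by
      by_contra h
      rw [Bool.not_eq_false, PySem.Set.contains_iff] at h
      apply hsub
      rw [List.any_eq_true]
      exact ⟨target, h, by simp [isIn_self]⟩
    simp only [hcon, hsub', Bool.false_eq_true, if_false]
    rw [Bool.eq_iff_iff, List.any_eq_true, not_isEmpty_iff_exists_mem]
    constructor
    · rintro ⟨fa, hfa, hconj⟩
      rw [Bool.and_eq_true, List.any_eq_true] at hconj
      obtain ⟨ht, uc, huc, hu⟩ := hconj
      refine ⟨fa.1, ?_⟩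
      rw [PySem.Set.mem_inter, mem_foldl_union]
      exact ⟨(mem_familiesOf _ _).2 ⟨fa, hfa, rfl, ht⟩,
        Or.inr ⟨uc, huc, (mem_familiesOf _ _).2 ⟨fa, hfa, rfl, hu⟩⟩⟩
    · rintro ⟨f, hf⟩
      rw [PySem.Set.mem_inter, mem_foldl_union] at hf
      obtain ⟨htf, huf⟩ := hf
      rcases huf with h | ⟨uc, hucm, hucf⟩
      · simp [PySem.Set.empty] at h
      · obtain ⟨fa, hfa, hfaf, ht⟩ := (mem_familiesOf _ _).1 htf
        obtain ⟨fb, hfb, hfbf, hu⟩ := (mem_familiesOf _ _).1 hucf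
        have heq : fa = fb := eq_of_fst_eq hfa hfb (by rw [hfaf, hfbf])
        subst heq
        exact ⟨fa, hfa, by rw [Bool.and_eq_true, List.any_eq_true]; exact ⟨ht, uc, hucm, hu⟩⟩
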